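-- pv_equiv track=rewrite | github.com/byYorick/hydro2.0 | backend/services/automation-engine/ae3lite/domain/services/correction_planner.py | _normalize_ec_component_alias
-- ===== SOURCE A (Python) =====
-- from typing import Any, Mapping, Optional
--
-- _EC_COMPONENT_LEGACY_ALIAS_MAP: dict[str, str] = {
--     "a": "npk",
--     "b": "calcium",
--     "c": "magnesium",
--     "d": "micro",
-- }
--
-- def _normalize_ec_component_alias(raw: Any) -> str:
--     value = str(raw or "").strip().lower()
--     if not value:
--         return ""
--     if value.startswith("ec_"):
--         return _normalize_ec_component_alias(value.removeprefix("ec_").removesuffix("_pump"))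
--     if value.startswith("dose_ec_"):
--         suffix = value.removeprefix("dose_ec_")
--         return _EC_COMPONENT_LEGACY_ALIAS_MAP.get(suffix, _normalize_ec_component_alias(suffix))
--     if value.startswith("pump_"):
--         suffix = value.removeprefix("pump_")
--         return _EC_COMPONENT_LEGACY_ALIAS_MAP.get(suffix, value)
--     return _EC_COMPONENT_LEGACY_ALIAS_MAP.get(value, value)
-- ===== SOURCE B (Python) =====
-- # B: explicit transition function + bounded fuel loop instead of A's self-recursion;
-- # branches reordered (dose_ec_ first, which is disjoint from ec_/pump_).
-- _EC_ALIASES = {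
--     "a": "npk",
--     "b": "calcium",
--     "c": "magnesium",
--     "d": "micro",
-- }
--
--
-- def _step(value):
--     """One normalization step: returns (True, result) when finished,
--     (False, next_value) when another pass is needed."""
--     if not value:
--         return True, ""
--     if value.startswith("dose_ec_"):
--         suffix = value[len("dose_ec_"):]
--         if suffix in _EC_ALIASES:
--             return True, _EC_ALIASES[suffix]
--         return False, suffix.strip().lower()
--     if value.startswith("ec_"):
--         trimmed = value[len("ec_"):]
--         if trimmed.endswith("_pump"):
--             trimmed = trimmed[:len(trimmed) - len("_pump")]
--         return False, trimmed.strip().lower()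
--     if value.startswith("pump_"):
--         return True, _EC_ALIASES.get(value[len("pump_"):], value)
--     return True, _EC_ALIASES.get(value, value)
--
--
-- def _normalize_ec_component_alias(raw):
--     value = str(raw or "").strip().lower()
--     # each continuing step drops at least 3 characters, so this fuel always suffices
--     for _ in range(len(value) + 1):
--         done, value = _step(value)
--         if done:
--             return value
--     return value
-- ===== Notes on version B (the rewrite author's own statement) =====
-- stated objective: alternative
-- what changed: Replaces A's self-recursion with an explicit one-step transition function returning a (done, next_value) pair, driven by a bounded fuel loop (len(value)+1 iterations), with the mutually exclusive prefix branches reordered (dose_ec_ tested first).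
import Mathlib
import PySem

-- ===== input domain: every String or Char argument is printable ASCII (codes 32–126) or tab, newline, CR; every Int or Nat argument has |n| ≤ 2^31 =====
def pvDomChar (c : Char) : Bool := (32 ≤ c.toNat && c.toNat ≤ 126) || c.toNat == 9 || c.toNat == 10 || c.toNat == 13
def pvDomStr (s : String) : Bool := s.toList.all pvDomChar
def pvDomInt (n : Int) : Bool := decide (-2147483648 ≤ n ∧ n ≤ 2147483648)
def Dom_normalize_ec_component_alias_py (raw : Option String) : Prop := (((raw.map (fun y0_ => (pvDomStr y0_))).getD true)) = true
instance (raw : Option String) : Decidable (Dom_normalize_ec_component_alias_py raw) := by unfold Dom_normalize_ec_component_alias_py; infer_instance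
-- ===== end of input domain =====

-- B replaces A's self-recursion by an explicit one-step transition function driven by a
-- bounded fuel loop (and tests the mutually exclusive prefixes in a different order); no side effects involved.

-- shared module constant _EC_COMPONENT_LEGACY_ALIAS_MAP (Source B's _EC_ALIASES is the identical literal)
def ecAliasMap : PySem.Dict (List Char) (List Char) :=
  PySem.Dict.ofList
    [("a".toList, "npk".toList), ("b".toList, "calcium".toList),
     ("c".toList, "magnesium".toList), ("d".toList, "micro".toList)]

-- exact hand port of str.removeprefix: s[len(p):] if s.startswith(p) else s
def rmPrefix (s p : List Char) : List Char :=
  if PySem.Chars.startswith s p then s.drop p.length else s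

-- exact hand port of str.removesuffix: s[:len(s)-len(p)] if p and s.endswith(p) else s (p ≠ [] here)
def rmSuffix (s p : List Char) : List Char :=
  if PySem.Chars.endswith s p then s.take (s.length - p.length) else s

theorem len_lower_strip_le (v : List Char) :
    (PySem.Chars.lower (PySem.Chars.strip v)).length ≤ v.length := by
  simp only [PySem.Chars.lower, PySem.Chars.strip, PySem.Chars.lstrip, PySem.Chars.rstrip,
    List.length_map, List.length_reverse]
  calc (List.dropWhile PySem.Chars.isspace (List.dropWhile PySem.Chars.isspace v).reverse).length
      ≤ (List.dropWhile PySem.Chars.isspace v).reverse.length := List.length_dropWhile_le _ _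
    _ ≤ v.length := by simpa using List.length_dropWhile_le PySem.Chars.isspace v

theorem len_rmPrefix_of_sw {s p : List Char} (h : PySem.Chars.startswith s p = true) :
    (rmPrefix s p).length = s.length - p.length ∧ p.length ≤ s.length := by
  have hp : p <+: s := by
    simpa [PySem.Chars.startswith, List.isPrefixOf_iff_prefix] using h
  constructor
  · simp [rmPrefix, h]
  · exact hp.length_le

theorem len_rmSuffix_le (s p : List Char) : (rmSuffix s p).length ≤ s.length := by
  unfold rmSuffix; split <;> simp [List.length_take]

-- ===== PORT A =====
-- recursive helper: body of _normalize_ec_component_alias on a string argument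
def normA (v : List Char) : List Char :=
  -- value = str(v or "").strip().lower(); on a string, 'v or ""' only replaces [] by [], which strip/lower keep
  let value := PySem.Chars.lower (PySem.Chars.strip v)
  if value = [] then []
  else if PySem.Chars.startswith value "ec_".toList then
    normA (rmSuffix (rmPrefix value "ec_".toList) "_pump".toList)
  else if PySem.Chars.startswith value "dose_ec_".toList then
    let suffix := rmPrefix value "dose_ec_".toList
    PySem.Dict.getD ecAliasMap suffix (normA suffix)
  else if PySem.Chars.startswith value "pump_".toList then
    let suffix := rmPrefix value "pump_".toList
    PySem.Dict.getD ecAliasMap suffix value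
  else PySem.Dict.getD ecAliasMap value value
termination_by v.length
decreasing_by
  · have hval : value = PySem.Chars.lower (PySem.Chars.strip v) := rfl
    have h1 := len_lower_strip_le v
    obtain ⟨h2, h2'⟩ := len_rmPrefix_of_sw (by assumption)
    have h3 := len_rmSuffix_le (rmPrefix value "ec_".toList) "_pump".toList
    have hl : ("ec_".toList).length = 3 := by decide
    simp only [hval, hl] at *
    omega
  · have hval : value = PySem.Chars.lower (PySem.Chars.strip v) := rfl
    have h1 := len_lower_strip_le v
    obtain ⟨h2, h2'⟩ := len_rmPrefix_of_sw (by assumption)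
    have hl : ("dose_ec_".toList).length = 8 := by decide
    simp only [hval, hl] at *
    omega

def normalize_ec_component_alias_py (raw : Option String) : String :=
  String.ofList (normA (raw.getD "").toList)

-- ===== PORT B =====
-- _step of Source B: one normalization step; (true, r) = finished with result r, (false, v') = continue with v'
def stepB (value : List Char) : Bool × List Char :=
  if value = [] then (true, [])
  else if PySem.Chars.startswith value "dose_ec_".toList then
    let suffix := value.drop ("dose_ec_".toList).length
    match PySem.Dict.get? ecAliasMap suffix with
    | some r => (true, r)
    | none => (false, PySem.Chars.lower (PySem.Chars.strip suffix))
  else if PySem.Chars.startswith value "ec_".toList then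
    let trimmed := value.drop ("ec_".toList).length
    let trimmed2 := if PySem.Chars.endswith trimmed "_pump".toList
      then trimmed.take (trimmed.length - ("_pump".toList).length) else trimmed
    (false, PySem.Chars.lower (PySem.Chars.strip trimmed2))
  else if PySem.Chars.startswith value "pump_".toList then
    (true, PySem.Dict.getD ecAliasMap (value.drop ("pump_".toList).length) value)
  else (true, PySem.Dict.getD ecAliasMap value value)

-- the 'for _ in range(len(value)+1)' fuel loop of Source B (the final 'return value' is the fuel-0 case)
def runB : Nat → List Char → List Char
  | 0, v => v
  | n + 1, v =>
    match stepB v with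
    | (true, r) => r
    | (false, v') => runB n v'

def normalize_ec_component_alias_py_alt (raw : Option String) : String :=
  let value := PySem.Chars.lower (PySem.Chars.strip (raw.getD "").toList)
  String.ofList (runB (value.length + 1) value)

-- ===== PRECONDITION & SPEC =====
def Spec_normalize_ec_component_alias_py (raw : Option String) (out : String) : Prop := out = normalize_ec_component_alias_py_alt raw
instance (raw : Option String) (out : String) : Decidable (Spec_normalize_ec_component_alias_py raw out) := by unfold Spec_normalize_ec_component_alias_py; infer_instance

-- ===== CLAIM (what is proved, stated in full; the proofs are below) =====
def Claim_equal_normalize_ec_component_alias_py : Prop := ∀ (raw : Option String), Dom_normalize_ec_component_alias_py raw → Spec_normalize_ec_component_alias_py raw (normalize_ec_component_alias_py raw)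

-- ===== LEMMAS AND PROOFS =====
-- a string starting with "ec_" cannot start with "dose_ec_" (B tests dose_ec_ first, A tests ec_ first)
theorem dose_false_of_ec (s : List Char)
    (h : PySem.Chars.startswith s "ec_".toList = true) :
    PySem.Chars.startswith s "dose_ec_".toList = false := by
  obtain ⟨t, rfl⟩ : "ec_".toList <+: s := by
    simpa [PySem.Chars.startswith, List.isPrefixOf_iff_prefix] using h
  simp [PySem.Chars.startswith, List.isPrefixOf]

theorem runB_succ (n : Nat) (v : List Char) :
    runB (n + 1) v = (match stepB v with
      | (true, r) => r
      | (false, v') => runB n v') := rfl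

theorem normA_eq_runB (v : List Char) :
    ∀ n : Nat, (PySem.Chars.lower (PySem.Chars.strip v)).length < n →
      runB n (PySem.Chars.lower (PySem.Chars.strip v)) = normA v := by
  fun_induction normA v
  case case1 x value h =>
    intro n hn
    have hv : PySem.Chars.lower (PySem.Chars.strip x) = value := rfl
    cases n with
    | zero => omega
    | succ m =>
      rw [hv, runB_succ]
      have hstep : stepB value = (true, []) := by
        unfold stepB; rw [if_pos h]
      rw [hstep]
  case case2 x value h hec ih =>
    intro n hn
    have hv : PySem.Chars.lower (PySem.Chars.strip x) = value := rfl
    cases n with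
    | zero => omega
    | succ m =>
      rw [hv] at hn ⊢
      have hdose := dose_false_of_ec value hec
      have hA : rmSuffix (rmPrefix value "ec_".toList) "_pump".toList
          = (if PySem.Chars.endswith (value.drop ("ec_".toList).length) "_pump".toList
              then (value.drop ("ec_".toList).length).take
                ((value.drop ("ec_".toList).length).length - ("_pump".toList).length)
              else value.drop ("ec_".toList).length) := by
        rw [rmSuffix, rmPrefix, if_pos hec]
      have hstep : stepB value
          = (false, PySem.Chars.lower (PySem.Chars.strip
              (if PySem.Chars.endswith (value.drop ("ec_".toList).length) "_pump".toList
                then (value.drop ("ec_".toList).length).take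
                  ((value.drop ("ec_".toList).length).length - ("_pump".toList).length)
                else value.drop ("ec_".toList).length))) := by
        unfold stepB
        rw [if_neg h, if_neg (by rw [hdose]; decide), if_pos hec]
      rw [runB_succ, hstep, ← hA]
      obtain ⟨h2, h2'⟩ := len_rmPrefix_of_sw hec
      have h3 := len_rmSuffix_le (rmPrefix value "ec_".toList) "_pump".toList
      have h4 := len_lower_strip_le (rmSuffix (rmPrefix value "ec_".toList) "_pump".toList)
      have hl : ("ec_".toList).length = 3 := by decide
      exact ih m (by omega)
  case case3 x value h hec hdose suffix ih =>
    intro n hn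
    have hv : PySem.Chars.lower (PySem.Chars.strip x) = value := rfl
    cases n with
    | zero => omega
    | succ m =>
      rw [hv] at hn ⊢
      have hs : value.drop ("dose_ec_".toList).length = suffix := by
        show _ = rmPrefix value "dose_ec_".toList
        rw [rmPrefix, if_pos hdose]
      have hstep : stepB value
          = (match PySem.Dict.get? ecAliasMap suffix with
              | some r => (true, r)
              | none => (false, PySem.Chars.lower (PySem.Chars.strip suffix))) := by
        unfold stepB
        rw [if_neg h, if_pos hdose, hs]
      rw [runB_succ, hstep]
      obtain ⟨h2, h2'⟩ := len_rmPrefix_of_sw hdose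
      have h4 := len_lower_strip_le suffix
      have hl : ("dose_ec_".toList).length = 8 := by decide
      have hsl : (suffix : List Char).length = value.length - ("dose_ec_".toList).length := h2
      show _ = PySem.Dict.getD ecAliasMap suffix (normA suffix)
      rw [PySem.Dict.getD]
      cases hg : PySem.Dict.get? ecAliasMap suffix with
      | some r => rfl
      | none => exact ih m (by omega)
  case case4 x value h hec hdose hpump suffix =>
    intro n hn
    have hv : PySem.Chars.lower (PySem.Chars.strip x) = value := rfl
    cases n with
    | zero => omega
    | succ m =>
      rw [hv]
      have hs : value.drop ("pump_".toList).length = suffix := by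
        show _ = rmPrefix value "pump_".toList
        rw [rmPrefix, if_pos hpump]
      have hstep : stepB value = (true, PySem.Dict.getD ecAliasMap suffix value) := by
        unfold stepB
        rw [if_neg h, if_neg hdose, if_neg hec, if_pos hpump, hs]
      rw [runB_succ, hstep]
  case case5 x value h hec hdose hpump =>
    intro n hn
    have hv : PySem.Chars.lower (PySem.Chars.strip x) = value := rfl
    cases n with
    | zero => omega
    | succ m =>
      rw [hv]
      have hstep : stepB value = (true, PySem.Dict.getD ecAliasMap value value) := by
        unfold stepB
        rw [if_neg h, if_neg hdose, if_neg hec, if_neg hpump]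
      rw [runB_succ, hstep]

-- ===== VERDICT (by name: the statement is the Claim_ definition above) =====
theorem normalize_ec_component_alias_py_spec : Claim_equal_normalize_ec_component_alias_py := by
  intro raw _
  unfold Spec_normalize_ec_component_alias_py normalize_ec_component_alias_py
    normalize_ec_component_alias_py_alt
  show String.ofList (normA (raw.getD "").toList)
      = String.ofList (runB ((PySem.Chars.lower (PySem.Chars.strip (raw.getD "").toList)).length + 1)
          (PySem.Chars.lower (PySem.Chars.strip (raw.getD "").toList)))
  rw [normA_eq_runB ((raw.getD "").toList) _ (by omega)]
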